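-- pv_equiv track=rewrite | github.com/minhaozhang/ModelGate | routes/user.py | format_hour_range
-- ===== SOURCE A (Python) =====
-- def format_hour_range(hour_values: list[int]) -> list[str]:
--     if not hour_values:
--         return []
--
--     sorted_hours = sorted(set(hour_values))
--     ranges: list[str] = []
--     start = sorted_hours[0]
--     end = start
--     for hour in sorted_hours[1:]:
--         if hour == end + 1:
--             end = hour
--             continue
--         ranges.append(f"{start:02d}:00-{(end + 1) % 24:02d}:00")
--         start = hour
--         end = hour
--     ranges.append(f"{start:02d}:00-{(end + 1) % 24:02d}:00")
--     return ranges
-- ===== SOURCE B (Python) =====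
-- def format_hour_range(hour_values: list[int]) -> list[str]:
--     if not hour_values:
--         return []
--     hours = sorted(set(hour_values))
--     breaks = [(a, b) for a, b in zip(hours, hours[1:]) if b != a + 1]
--     starts = hours[:1] + [b for _, b in breaks]
--     ends = [a for a, _ in breaks] + hours[-1:]
--     return [f"{s:02d}:00-{(e + 1) % 24:02d}:00" for s, e in zip(starts, ends)]
-- ===== Notes on version B (the rewrite author's own statement) =====
-- stated objective: alternative
-- what changed: A threads a (ranges, start, end) accumulator through one stateful loop over the sorted deduplicated hours, emitting a string whenever a run ends; B is stateless: it filters the non-consecutive adjacent pairs of the sorted hours once, reads the run starts and run ends off that break list independently, and zips the two lists into the formatted output.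
import Mathlib
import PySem

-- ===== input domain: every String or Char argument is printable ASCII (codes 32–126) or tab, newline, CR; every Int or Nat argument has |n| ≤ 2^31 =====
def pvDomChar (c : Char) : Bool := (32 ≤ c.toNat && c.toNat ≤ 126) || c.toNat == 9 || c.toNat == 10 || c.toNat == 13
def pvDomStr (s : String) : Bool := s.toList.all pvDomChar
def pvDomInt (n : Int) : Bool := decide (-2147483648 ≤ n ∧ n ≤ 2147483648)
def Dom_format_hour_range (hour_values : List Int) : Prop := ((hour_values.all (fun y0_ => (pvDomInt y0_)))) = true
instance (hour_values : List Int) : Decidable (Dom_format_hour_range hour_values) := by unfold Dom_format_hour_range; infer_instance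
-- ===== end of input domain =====

-- B replaces A's stateful (ranges, start, end) accumulator loop with a stateless
-- decomposition: detect the break points between adjacent sorted hours once, read run
-- starts and run ends off them independently, and zip the two lists (objective: alternative).

-- shared f-string helper: f"{s:02d}:00-{(e+1)%24:02d}:00" (both Pythons contain this literal format)
-- pad02 n = format(n, '02d'): exact for width 2 (a negative n is at least 2 chars already)
def pad02 (n : Int) : List Char :=
  if 0 ≤ n ∧ n < 10 then '0' :: PySem.Int.toChars n else PySem.Int.toChars n

def fmtRange (s e : Int) : String :=
  String.ofList (pad02 s ++ (':' :: '0' :: '0' :: '-' :: pad02 (PySem.Int.mod (e + 1) 24)) ++ [':', '0', '0'])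

-- ===== PORT A =====
def format_hour_range (hour_values : List Int) : List String :=
  if hour_values = [] then []
  else
    match PySem.List.sorted (PySem.Set.ofList hour_values) (fun x => x) false with
    | [] => []  -- unreachable: sorted(set(..)) of a nonempty list is nonempty
    | s0 :: rest =>
      let st := rest.foldl (fun (acc : List String × Int × Int) hour =>
        if hour = acc.2.2 + 1 then (acc.1, acc.2.1, hour)
        else (acc.1 ++ [fmtRange acc.2.1 acc.2.2], hour, hour)) ([], s0, s0)
      st.1 ++ [fmtRange st.2.1 st.2.2]

-- ===== PORT B =====
def format_hour_range_alt (hour_values : List Int) : List String :=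
  if hour_values = [] then []
  else
    let hours := PySem.List.sorted (PySem.Set.ofList hour_values) (fun x => x) false
    -- zip(hours, hours[1:]) filtered on b != a + 1
    let breaks := (hours.zip (PySem.List.slice hours (some 1) none)).filter
      (fun p => p.2 != p.1 + 1)
    -- hours[:1] + starts of later runs
    let starts := PySem.List.slice hours none (some 1) ++ breaks.map Prod.snd
    -- ends of earlier runs + hours[-1:]
    let ends := breaks.map Prod.fst ++ PySem.List.slice hours (some (-1)) none
    (starts.zip ends).map (fun p => fmtRange p.1 p.2)

-- ===== PRECONDITION & SPEC =====
def Spec_format_hour_range (hour_values : List Int) (out : List String) : Prop := out = format_hour_range_alt hour_values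
instance (hour_values : List Int) (out : List String) : Decidable (Spec_format_hour_range hour_values out) := by unfold Spec_format_hour_range; infer_instance

-- ===== CLAIM (what is proved, stated in full; the proofs are below) =====
def Claim_equal_format_hour_range : Prop := ∀ (hour_values : List Int), Dom_format_hour_range hour_values → Spec_format_hour_range hour_values (format_hour_range hour_values)

-- ===== LEMMAS AND PROOFS =====

-- the break pairs of the list x :: l (zip with its tail, keeping the non-consecutive pairs)
def brk (x : Int) (l : List Int) : List (Int × Int) :=
  ((x :: l).zip l).filter (fun p => p.2 != p.1 + 1)

-- A's loop with accumulator (acc, s, x) over the remaining list l, followed by the final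
-- append, equals the zip of B's start/end lists for x :: l (with s replacing the first
-- start): the accumulator's `end` is always the previously seen element, so A's merge test
-- `hour = end + 1` is exactly the adjacent-pair test defining brk.
theorem loop_eq_brk (l : List Int) :
    ∀ (acc : List String) (s x : Int),
    (let st := l.foldl (fun (acc : List String × Int × Int) hour =>
        if hour = acc.2.2 + 1 then (acc.1, acc.2.1, hour)
        else (acc.1 ++ [fmtRange acc.2.1 acc.2.2], hour, hour)) (acc, s, x)
     st.1 ++ [fmtRange st.2.1 st.2.2])
    = acc ++ (((s :: (brk x l).map Prod.snd).zip
        ((brk x l).map Prod.fst ++ [(x :: l).getLast (by simp)])).map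
          (fun p => fmtRange p.1 p.2)) := by
  induction l with
  | nil =>
    intro acc s x
    simp [brk]
  | cons h t ih =>
    intro acc s x
    by_cases hc : h = x + 1
    · have hb : brk x (h :: t) = brk h t := by
        simp [brk, hc]
      simp only [List.foldl_cons, if_pos (show h = x + 1 by simpa using hc)]
      have := ih acc s h
      simp only [hb]
      simpa [List.getLast] using this
    · have hb : brk x (h :: t) = (x, h) :: brk h t := by
        simp [brk, hc]
      simp only [List.foldl_cons, if_neg (show ¬ h = x + 1 by simpa using hc)]
      have := ih (acc ++ [fmtRange s x]) h h
      simp only [hb, List.map_cons]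
      simp only [List.append_assoc, List.singleton_append] at this ⊢
      rw [this]
      simp [List.getLast]

-- ===== VERDICT (by name: the statement is the Claim_ definition above) =====
theorem format_hour_range_spec : Claim_equal_format_hour_range := by
  intro hv _
  unfold Spec_format_hour_range format_hour_range format_hour_range_alt
  by_cases hnil : hv = []
  · simp [hnil]
  · simp only [if_neg hnil]
    generalize PySem.List.sorted (PySem.Set.ofList hv) (fun x => x) false = l
    cases l with
    | nil => simp [pysem]
    | cons s0 rest =>
      have hlast : (s0 :: rest).drop ((s0 :: rest).length - 1)
          = [(s0 :: rest).getLast (by simp)] := List.drop_length_sub_one (by simp)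
      rw [PySem.List.slice_from_one, PySem.List.slice_from_neg_one]
      simp only [List.tail_cons, hlast]
      have := loop_eq_brk rest [] s0 s0
      simp only [List.nil_append] at this
      refine this.trans ?_
      have h1 : PySem.List.slice (s0 :: rest) none (some 1) = [s0] := by
        simp [PySem.List.slice, PySem.List.clampIdx]
      rw [h1]
      simp [brk]
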